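-- pv_equiv track=rewrite | github.com/VenciFreeman/personal-rag-dashboard | nav_dashboard/web/services/agent/domain/media_tools.py | _match_local_terms
-- ===== SOURCE A (Python) =====
-- def _match_local_terms(haystacks: list[str], vocabulary: list[str], limit: int = 12) -> list[str]:
--     matched: list[str] = []
--     plain_haystacks = [str(item or "") for item in haystacks if str(item or "").strip()]
--     for value in vocabulary:
--         clean = str(value or "").strip()
--         if not clean:
--             continue
--         if any(clean in haystack for haystack in plain_haystacks):
--             matched.append(clean)
--         if len(matched) >= limit:
--             break
--     return matched
-- ===== SOURCE B (Python) =====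
-- def _match_local_terms(haystacks: list[str], vocabulary: list[str], limit: int = 12) -> list[str]:
--     cleaned = [str(v or "").strip() for v in vocabulary]
--     lengths = list(dict.fromkeys(len(c) for c in cleaned if c))
--     grams = set()
--     for item in haystacks:
--         text = str(item or "")
--         if not text.strip():
--             continue
--         for L in lengths:
--             for i in range(len(text) - L + 1):
--                 grams.add(text[i:i+L])
--     matched: list[str] = []
--     for clean in cleaned:
--         if not clean:
--             continue
--         if clean in grams:
--             matched.append(clean)
--         if len(matched) >= limit:
--             break
--     return matched
-- ===== Notes on version B (the rewrite author's own statement) =====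
-- stated objective: faster
-- what changed: Instead of running a substring search of every vocabulary term over every haystack, B builds once a set of all haystack substrings whose lengths occur among the cleaned vocabulary terms, then answers each term by a single set lookup.
import Mathlib
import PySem

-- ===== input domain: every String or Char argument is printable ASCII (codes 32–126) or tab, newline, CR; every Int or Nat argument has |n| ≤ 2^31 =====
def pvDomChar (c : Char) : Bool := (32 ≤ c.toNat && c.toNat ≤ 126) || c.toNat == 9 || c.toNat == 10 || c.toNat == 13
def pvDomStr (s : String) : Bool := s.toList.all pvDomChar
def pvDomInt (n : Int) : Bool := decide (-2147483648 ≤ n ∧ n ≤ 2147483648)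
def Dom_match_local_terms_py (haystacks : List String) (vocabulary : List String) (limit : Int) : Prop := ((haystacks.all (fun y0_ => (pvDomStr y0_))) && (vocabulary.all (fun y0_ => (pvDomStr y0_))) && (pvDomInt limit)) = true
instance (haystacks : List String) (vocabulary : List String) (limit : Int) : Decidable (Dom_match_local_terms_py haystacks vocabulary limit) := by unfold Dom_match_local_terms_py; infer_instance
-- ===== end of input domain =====

-- B replaces A's per-term scan over every haystack (substring search each time) by a gram set of all
-- haystack substrings whose length occurs among the cleaned vocabulary terms, built once, so each term
-- is a single set lookup; objective: alternative/faster on many-term vocabularies.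

-- truthiness of str(x).strip() — shared by both ports (both Pythons compute exactly this test)
def pvBlank (s : String) : Bool := (PySem.Chars.strip s.toList).isEmpty

-- ===== PORT A =====
-- the vocabulary loop of A: append on any()-match, break once len(matched) >= limit
def pvGoA (plain : List String) (limit : Int) : List String → List String → List String
  | [], matched => matched
  | value :: rest, matched =>
    if pvBlank value then pvGoA plain limit rest matched
    else
      let clean := PySem.Str.strip value
      let matched' := if plain.any (fun h => PySem.Str.isIn clean h) then matched ++ [clean] else matched
      if limit ≤ (matched'.length : Int) then matched' else pvGoA plain limit rest matched'

def match_local_terms_py (haystacks : List String) (vocabulary : List String) (limit : Int) : List String :=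
  let plain := haystacks.filter (fun item => !pvBlank item)
  pvGoA plain limit vocabulary []

-- ===== PORT B =====
-- lengths = list(dict.fromkeys(len(c) for c in cleaned if c))
def pvLengths (cleaned : List String) : List Int :=
  PySem.List.dedup ((cleaned.filter (fun c => !c.toList.isEmpty)).map (fun c => ((c.toList.length : Nat) : Int)))

-- for L in lengths: for i in range(len(text) - L + 1): grams.add(text[i:i+L])
def pvAddGrams (lengths : List Int) (g : PySem.Set String) (text : String) : PySem.Set String :=
  lengths.foldl (fun g L =>
    (PySem.List.pyRange 0 (((text.toList.length : Nat) : Int) - L + 1) 1).foldl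
      (fun g i => PySem.Set.add g (PySem.Str.slice text (some i) (some (i + L)))) g) g

-- the final loop of B: membership test against the gram set, same append/break protocol
def pvGoB (grams : PySem.Set String) (limit : Int) : List String → List String → List String
  | [], matched => matched
  | clean :: rest, matched =>
    if clean.toList.isEmpty then pvGoB grams limit rest matched
    else
      let matched' := if PySem.Set.contains grams clean then matched ++ [clean] else matched
      if limit ≤ (matched'.length : Int) then matched' else pvGoB grams limit rest matched'

def match_local_terms_py_alt (haystacks : List String) (vocabulary : List String) (limit : Int) : List String :=
  let cleaned := vocabulary.map (fun v => PySem.Str.strip v)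
  let lengths := pvLengths cleaned
  let grams := haystacks.foldl
    (fun g item => if pvBlank item then g else pvAddGrams lengths g item) PySem.Set.empty
  pvGoB grams limit cleaned []

-- ===== PRECONDITION & SPEC =====
def Spec_match_local_terms_py (haystacks : List String) (vocabulary : List String) (limit : Int) (out : List String) : Prop := out = match_local_terms_py_alt haystacks vocabulary limit
instance (haystacks : List String) (vocabulary : List String) (limit : Int) (out : List String) : Decidable (Spec_match_local_terms_py haystacks vocabulary limit out) := by unfold Spec_match_local_terms_py; infer_instance

-- ===== CLAIM (what is proved, stated in full; the proofs are below) =====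
def Claim_equal_match_local_terms_py : Prop := ∀ (haystacks : List String) (vocabulary : List String) (limit : Int), Dom_match_local_terms_py haystacks vocabulary limit → Spec_match_local_terms_py haystacks vocabulary limit (match_local_terms_py haystacks vocabulary limit)

-- ===== LEMMAS AND PROOFS =====

-- membership in a fold of Set.add over a generating list
lemma pv_mem_foldl_add {α : Type} (f : α → String) (l : List α) :
    ∀ (g : PySem.Set String) (x : String),
      (x ∈ l.foldl (fun g i => PySem.Set.add g (f i)) g) ↔ x ∈ g ∨ ∃ i ∈ l, x = f i := by
  induction l with
  | nil => simp
  | cons a t ih =>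
    intro g x
    simp only [List.foldl_cons, ih, PySem.Set.mem_add, List.mem_cons]
    constructor
    · rintro (⟨h | h⟩ | ⟨i, hi, rfl⟩)
      · exact Or.inl h
      · exact Or.inr ⟨a, Or.inl rfl, h⟩
      · exact Or.inr ⟨i, Or.inr hi, rfl⟩
    · rintro (h | ⟨i, hi | hi, rfl⟩)
      · exact Or.inl (Or.inl h)
      · subst hi; exact Or.inl (Or.inr rfl)
      · exact Or.inr ⟨i, hi, rfl⟩

-- all grams produced from one haystack
def pvHit (text : String) (lengths : List Int) (x : String) : Prop :=
  ∃ L ∈ lengths, ∃ i ∈ PySem.List.pyRange 0 (((text.toList.length : Nat) : Int) - L + 1) 1,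
    x = PySem.Str.slice text (some i) (some (i + L))

lemma pv_mem_addGrams (text : String) (lengths : List Int) :
    ∀ (g : PySem.Set String) (x : String),
      (x ∈ pvAddGrams lengths g text) ↔ x ∈ g ∨ pvHit text lengths x := by
  induction lengths with
  | nil => simp [pvAddGrams, pvHit]
  | cons L t ih =>
    intro g x
    simp only [pvAddGrams, List.foldl_cons] at *
    rw [ih, pv_mem_foldl_add]
    simp only [pvHit, List.mem_cons]
    constructor
    · rintro (⟨h | ⟨i, hi, rfl⟩⟩ | ⟨M, hM, i, hi, rfl⟩)
      · exact Or.inl h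
      · exact Or.inr ⟨L, Or.inl rfl, i, hi, rfl⟩
      · exact Or.inr ⟨M, Or.inr hM, i, hi, rfl⟩
    · rintro (h | ⟨M, hM | hM, i, hi, rfl⟩)
      · exact Or.inl (Or.inl h)
      · subst hM; exact Or.inl (Or.inr ⟨i, hi, rfl⟩)
      · exact Or.inr ⟨M, hM, i, hi, rfl⟩

lemma pv_mem_grams (lengths : List Int) (hs : List String) :
    ∀ (g : PySem.Set String) (x : String),
      (x ∈ hs.foldl (fun g item => if pvBlank item then g else pvAddGrams lengths g item) g) ↔
        x ∈ g ∨ ∃ t ∈ hs, pvBlank t = false ∧ pvHit t lengths x := by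
  induction hs with
  | nil => simp
  | cons a t ih =>
    intro g x
    simp only [List.foldl_cons, ih, List.mem_cons]
    by_cases hb : pvBlank a
    · simp only [hb]
      constructor
      · rintro (h | ⟨s, hs', hbs, hhit⟩)
        · exact Or.inl h
        · exact Or.inr ⟨s, Or.inr hs', hbs, hhit⟩
      · rintro (h | ⟨s, hs' | hs', hbs, hhit⟩)
        · exact Or.inl h
        · subst hs'; simp [hb] at hbs
        · exact Or.inr ⟨s, hs', hbs, hhit⟩
    · rw [if_neg hb, pv_mem_addGrams]
      constructor
      · rintro ((h | hhit) | ⟨s, hs', hbs, hhit⟩)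
        · exact Or.inl h
        · exact Or.inr ⟨a, Or.inl rfl, by simp [hb], hhit⟩
        · exact Or.inr ⟨s, Or.inr hs', hbs, hhit⟩
      · rintro (h | ⟨s, hs' | hs', hbs, hhit⟩)
        · exact Or.inl (Or.inl h)
        · subst hs'; exact Or.inl (Or.inr hhit)
        · exact Or.inr ⟨s, hs', hbs, hhit⟩

-- any gram of a haystack is an infix of it
lemma pv_slice_infix (text x : String) (m : Nat) (i : Int) (hi : 0 ≤ i)
    (hx : x = PySem.Str.slice text (some i) (some (i + (m : Int)))) :
    x.toList <:+: text.toList := by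
  obtain ⟨j, rfl⟩ : ∃ j : Nat, i = (j : Int) := ⟨i.toNat, (Int.toNat_of_nonneg hi).symm⟩
  subst hx
  rw [PySem.Str.toList_slice]
  show PySem.List.slice text.toList (some (j : Int)) (some ((j : Int) + (m : Int))) <:+: text.toList
  rw [PySem.List.slice_natCast_add]
  exact (List.take_prefix m _).isInfix.trans (List.drop_suffix j _).isInfix

-- any infix occurs among the grams of its length
lemma pv_infix_slice (text clean : String) (h : clean.toList <:+: text.toList) :
    ∃ i ∈ PySem.List.pyRange 0 (((text.toList.length : Nat) : Int) - ((clean.toList.length : Nat) : Int) + 1) 1,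
      clean = PySem.Str.slice text (some i) (some (i + ((clean.toList.length : Nat) : Int))) := by
  obtain ⟨t, u, hs⟩ := h
  have hlen : text.toList.length = t.length + clean.toList.length + u.length := by
    rw [← hs]; simp; omega
  refine ⟨(t.length : Int), ?_, ?_⟩
  · rw [PySem.List.mem_pyRange_one]
    constructor
    · positivity
    · rw [hlen]; push_cast; omega
  · have hlist : PySem.Chars.slice text.toList (some (t.length : Int))
        (some ((t.length : Int) + ((clean.toList.length : Nat) : Int))) = clean.toList := by
      show PySem.List.slice text.toList (some ((t.length : Nat) : Int))
        (some (((t.length : Nat) : Int) + ((clean.toList.length : Nat) : Int))) = clean.toList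
      rw [PySem.List.slice_natCast_add, ← hs, List.append_assoc, List.drop_left, List.take_left]
    have hslice : PySem.Str.slice text (some (t.length : Int))
        (some ((t.length : Int) + ((clean.toList.length : Nat) : Int)))
        = String.ofList (PySem.Chars.slice text.toList (some (t.length : Int))
            (some ((t.length : Int) + ((clean.toList.length : Nat) : Int)))) := rfl
    rw [hslice, hlist, String.ofList_toList]

-- the key point: the gram-set lookup equals A's scan over the non-blank haystacks
lemma pv_key (haystacks cleaned : List String) (clean : String)
    (hmem : clean ∈ cleaned) (hne : clean.toList.isEmpty = false) :
    PySem.Set.contains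
      (haystacks.foldl (fun g item => if pvBlank item then g else pvAddGrams (pvLengths cleaned) g item)
        PySem.Set.empty) clean
      = (haystacks.filter (fun item => !pvBlank item)).any (fun h => PySem.Str.isIn clean h) := by
  rw [Bool.eq_iff_iff, PySem.Set.contains_iff, pv_mem_grams, List.any_eq_true]
  constructor
  · rintro (h | ⟨t, ht, hbt, M, _hM, i, hi, rfl⟩)
    · simp [PySem.Set.empty] at h
    · have hM' : ∃ m : Nat, M = (m : Int) := by
        have := _hM
        rw [pvLengths, PySem.List.mem_dedup, List.mem_map] at this
        obtain ⟨c, _, rfl⟩ := this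
        exact ⟨c.toList.length, rfl⟩
      obtain ⟨m, rfl⟩ := hM'
      have hnn : (0 : Int) ≤ i := (PySem.List.mem_pyRange_one.mp hi).1
      refine ⟨t, ?_, ?_⟩
      · rw [List.mem_filter]; simp [ht, hbt]
      · rw [PySem.Str.isIn_iff_infix]
        exact pv_slice_infix t _ m i hnn rfl
  · rintro ⟨t, ht, hIn⟩
    rw [List.mem_filter] at ht
    obtain ⟨ht1, ht2⟩ := ht
    rw [PySem.Str.isIn_iff_infix] at hIn
    obtain ⟨i, hi, hclean⟩ := pv_infix_slice t clean hIn
    refine Or.inr ⟨t, ht1, by simpa using ht2, ((clean.toList.length : Nat) : Int), ?_, i, hi, hclean⟩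
    rw [pvLengths, PySem.List.mem_dedup, List.mem_map]
    exact ⟨clean, by rw [List.mem_filter]; simp [hmem, hne], rfl⟩

-- the two loops agree step for step once the inner test agrees on every term
lemma pv_go_eq (plain : List String) (grams : PySem.Set String) (limit : Int) :
    ∀ (vocab matched : List String),
      (∀ v ∈ vocab, pvBlank v = false →
        PySem.Set.contains grams (PySem.Str.strip v)
          = plain.any (fun h => PySem.Str.isIn (PySem.Str.strip v) h)) →
      pvGoA plain limit vocab matched
        = pvGoB grams limit (vocab.map (fun v => PySem.Str.strip v)) matched := by
  intro vocab
  induction vocab with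
  | nil => intro matched _; simp [pvGoA, pvGoB]
  | cons v rest ih =>
    intro matched hk
    have hblank : (PySem.Str.strip v).toList.isEmpty = pvBlank v := by
      simp [pvBlank, PySem.Str.toList_strip]
    simp only [pvGoA, pvGoB, List.map_cons, hblank]
    by_cases hb : pvBlank v
    · rw [if_pos hb, if_pos hb]
      exact ih matched (fun w hw => hk w (List.mem_cons_of_mem v hw))
    · rw [if_neg hb, if_neg hb,
        hk v (List.mem_cons_self ..) (Bool.eq_false_iff.mpr hb)]
      set matched' := if plain.any (fun h => PySem.Str.isIn (PySem.Str.strip v) h)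
          then matched ++ [PySem.Str.strip v] else matched with hm
      by_cases hl : limit ≤ (matched'.length : Int)
      · rw [if_pos hl, if_pos hl]
      · rw [if_neg hl, if_neg hl]
        exact ih matched' (fun w hw => hk w (List.mem_cons_of_mem v hw))

-- ===== VERDICT (by name: the statement is the Claim_ definition above) =====
theorem match_local_terms_py_spec : Claim_equal_match_local_terms_py := by
  intro haystacks vocabulary limit _
  unfold Spec_match_local_terms_py match_local_terms_py match_local_terms_py_alt
  apply pv_go_eq
  intro v hv hb
  apply pv_key haystacks (vocabulary.map (fun v => PySem.Str.strip v)) (PySem.Str.strip v)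
    (List.mem_map_of_mem hv)
  rw [PySem.Str.toList_strip]
  exact Bool.eq_false_iff.mpr (by simpa [pvBlank] using Bool.eq_false_iff.mp hb)
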